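-- pv_equiv track=rewrite | github.com/iammouadagr/app-bi-choix-social | methods/ranked_pairs.py | creates_cycle
-- ===== SOURCE A (Python) =====
-- def creates_cycle(candidates, pairwise_comparisons):
--     """Checks if adding any candidate to the given list of candidates creates a cycle."""
--     for candidate in candidates:
--         for other_candidate in candidates:
--             if candidate == other_candidate:
--                 continue
--             if (candidate, other_candidate) in pairwise_comparisons and (other_candidate, candidate) in pairwise_comparisons:
--                 if pairwise_comparisons[(candidate, other_candidate)] > pairwise_comparisons[(other_candidate, candidate)]:
--                     return True
--     return False
-- ===== SOURCE B (Python) =====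
-- def creates_cycle(candidates, pairwise_comparisons):
--     """Checks if adding any candidate to the given list of candidates creates a cycle."""
--     cand = set(candidates)
--     for (a, b), v in pairwise_comparisons.items():
--         if a in cand and b in cand and a != b:
--             w = pairwise_comparisons.get((b, a))
--             if w is not None and v > w:
--                 return True
--     return False
-- ===== Notes on version B (the rewrite author's own statement) =====
-- stated objective: faster
-- what changed: Replaces the nested candidate x candidate double loop with a single pass over the comparison table's entries, testing candidate membership in a prebuilt set and looking up only the reverse pair.
import Mathlib
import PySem

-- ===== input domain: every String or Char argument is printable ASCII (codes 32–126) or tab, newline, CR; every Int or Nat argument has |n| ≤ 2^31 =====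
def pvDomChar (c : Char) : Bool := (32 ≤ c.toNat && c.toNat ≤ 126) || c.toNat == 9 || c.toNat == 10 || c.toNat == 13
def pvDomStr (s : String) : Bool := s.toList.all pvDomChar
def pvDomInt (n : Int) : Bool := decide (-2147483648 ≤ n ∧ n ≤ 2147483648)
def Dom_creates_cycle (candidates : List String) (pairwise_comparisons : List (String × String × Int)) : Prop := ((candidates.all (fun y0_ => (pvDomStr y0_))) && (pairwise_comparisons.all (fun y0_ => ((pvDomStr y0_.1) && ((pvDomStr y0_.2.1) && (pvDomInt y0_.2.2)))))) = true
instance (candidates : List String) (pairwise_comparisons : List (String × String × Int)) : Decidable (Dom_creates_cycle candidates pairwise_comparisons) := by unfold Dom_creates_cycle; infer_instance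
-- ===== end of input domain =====

-- B replaces A's candidate×candidate double loop (O(c^2)) by a single pass over the
-- comparison table's entries with a prebuilt candidate set (O(c + m)); measured faster.

-- ===== PORT A =====
-- dict lookup on the assoc-list representation: first match (keys of a Python dict are unique)
def pvLookup? (pc : List (String × String × Int)) (a b : String) : Option Int :=
  (pc.find? (fun e => e.1 == a && e.2.1 == b)).map (fun e => e.2.2)

def creates_cycle (candidates : List String) (pairwise_comparisons : List (String × String × Int)) : Bool :=
  candidates.any (fun candidate =>
    candidates.any (fun other_candidate =>
      if candidate == other_candidate then false
      else
        -- `(c,o) in pc and (o,c) in pc` then `pc[(c,o)] > pc[(o,c)]`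
        match pvLookup? pairwise_comparisons candidate other_candidate,
              pvLookup? pairwise_comparisons other_candidate candidate with
        | some v, some w => decide (w < v)
        | _, _ => false))

-- ===== PORT B =====
-- `.items()` of the dict represented as a first-match assoc list: the first
-- occurrence of each key, in insertion order (exact for a Python dict, whose keys are unique)
def pvItems : List (String × String × Int) → List (String × String × Int)
  | [] => []
  | e :: rest =>
      e :: pvItems (rest.filter (fun e' => !(e'.1 == e.1 && e'.2.1 == e.2.1)))
  termination_by l => l.length
  decreasing_by simpa using Nat.lt_succ_of_le ((List.length_filter_le _ _).trans (Nat.le_of_eq List.length_attach))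

def creates_cycle_alt (candidates : List String) (pairwise_comparisons : List (String × String × Int)) : Bool :=
  let cand := PySem.Set.ofList candidates
  (pvItems pairwise_comparisons).any (fun e =>
    cand.contains e.1 && cand.contains e.2.1 && !(e.1 == e.2.1) &&
      -- w = pairwise_comparisons.get((b, a)); w is not None and v > w
      match pvLookup? pairwise_comparisons e.2.1 e.1 with
      | some w => decide (w < e.2.2)
      | none => false)

-- ===== PRECONDITION & SPEC =====
def Spec_creates_cycle (candidates : List String) (pairwise_comparisons : List (String × String × Int)) (out : Bool) : Prop := out = creates_cycle_alt candidates pairwise_comparisons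
instance (candidates : List String) (pairwise_comparisons : List (String × String × Int)) (out : Bool) : Decidable (Spec_creates_cycle candidates pairwise_comparisons out) := by unfold Spec_creates_cycle; infer_instance

-- ===== CLAIM (what is proved, stated in full; the proofs are below) =====
def Claim_equal_creates_cycle : Prop := ∀ (candidates : List String) (pairwise_comparisons : List (String × String × Int)), Dom_creates_cycle candidates pairwise_comparisons → Spec_creates_cycle candidates pairwise_comparisons (creates_cycle candidates pairwise_comparisons)

-- ===== LEMMAS AND PROOFS =====

-- the filtered tail as the wf-recursion elaborator states it, in plain form
lemma pvItems_filter_eq (rest : List (String × String × Int)) (e : String × String × Int) :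
    (List.filter (fun x => match x with | ⟨e', _⟩ => !(e'.1 == e.1 && e'.2.1 == e.2.1)) rest.attach).unattach
    = rest.filter (fun e' => !(e'.1 == e.1 && e'.2.1 == e.2.1)) := by
  rw [List.unattach_filter (g := fun e' => !(e'.1 == e.1 && e'.2.1 == e.2.1))]
  · simp
  · intro x h; rfl

lemma pvItems_subset (pc : List (String × String × Int)) :
    ∀ e ∈ pvItems pc, e ∈ pc := by
  induction pc using pvItems.induct with
  | case1 => simp [pvItems]
  | case2 e0 rest ih =>
      rw [pvItems_filter_eq] at ih
      intro e he
      rw [pvItems] at he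
      rcases List.mem_cons.mp he with he | he
      · simp [he]
      · exact List.mem_cons_of_mem _ (List.mem_of_mem_filter (ih e he))

lemma find?_filter_of_imp {α : Type} (p q : α → Bool) (l : List α)
    (h : ∀ x, p x = true → q x = true) :
    (l.filter q).find? p = l.find? p := by
  induction l with
  | nil => rfl
  | cons x xs ih =>
      by_cases hq : q x = true
      · by_cases hp : p x = true
        · simp [hq, hp]
        · simp [hq, hp, ih]
      · have hp : p x = false := by
          cases hpx : p x with
          | false => rfl
          | true => exact absurd (h x hpx) hq
        simp [hq, hp, ih]

lemma mem_pvItems (pc : List (String × String × Int)) (e : String × String × Int) :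
    e ∈ pvItems pc ↔ pvLookup? pc e.1 e.2.1 = some e.2.2 := by
  induction pc using pvItems.induct with
  | case1 => simp [pvItems, pvLookup?]
  | case2 e0 rest ih =>
      rw [pvItems_filter_eq] at ih
      rw [pvItems]
      by_cases hkey : e0.1 = e.1 ∧ e0.2.1 = e.2.1
      · have hp : (e0.1 == e.1 && e0.2.1 == e.2.1) = true := by
          simp [hkey.1, hkey.2]
        constructor
        · intro he
          rcases List.mem_cons.mp he with he | he
          · simp [pvLookup?, ← he]
          · -- e is in the filtered tail, so its key differs from e0's: contradiction
            exfalso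
            have hf := List.of_mem_filter (pvItems_subset _ e he)
            rw [← hkey.1, ← hkey.2] at hf
            simp at hf
        · intro hl
          simp only [pvLookup?, List.find?_cons, hp, Option.map_some, Option.some.injEq] at hl
          have : e = e0 := by
            obtain ⟨a, b, v⟩ := e; obtain ⟨a0, b0, v0⟩ := e0
            simp only at hkey hl
            simp [hkey.1, hkey.2, hl]
          exact this ▸ List.mem_cons_self
      · have hp : (e0.1 == e.1 && e0.2.1 == e.2.1) = false := by
          rcases not_and_or.mp hkey with h | h <;> simp [h]
        have hfilter :
            (rest.filter (fun e' => !(e'.1 == e0.1 && e'.2.1 == e0.2.1))).find?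
              (fun x => x.1 == e.1 && x.2.1 == e.2.1)
            = rest.find? (fun x => x.1 == e.1 && x.2.1 == e.2.1) := by
          apply find?_filter_of_imp
          intro x hx
          simp only [Bool.and_eq_true, beq_iff_eq] at hx
          simp only [Bool.not_eq_eq_eq_not, Bool.not_true, Bool.and_eq_false_iff,
            beq_eq_false_iff_ne]
          rcases not_and_or.mp hkey with h | h
          · exact Or.inl (by rw [hx.1]; exact fun hh => h hh.symm)
          · exact Or.inr (by rw [hx.2]; exact fun hh => h hh.symm)
        have hne : e ≠ e0 := fun h => hkey ⟨by rw [h], by rw [h]⟩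
        rw [List.mem_cons]
        simp only [pvLookup?, List.find?_cons, hp, hfilter] at ih ⊢
        constructor
        · rintro (h | h)
          · exact absurd h hne
          · exact ih.mp h
        · intro h
          exact Or.inr (ih.mpr h)

lemma match2_eq_true (o1 o2 : Option Int) :
    (match o1, o2 with
     | some v, some w => decide (w < v)
     | _, _ => false) = true ↔ ∃ v w, o1 = some v ∧ o2 = some w ∧ w < v := by
  cases o1 <;> cases o2 <;> simp

lemma match1_eq_true (o : Option Int) (x : Int) :
    (match o with
     | some w => decide (w < x)
     | none => false) = true ↔ ∃ w, o = some w ∧ w < x := by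
  cases o <;> simp

lemma pvLookup?_shape (pc : List (String × String × Int)) (a b : String) (v : Int)
    (h : pvLookup? pc a b = some v) : (a, b, v) ∈ pvItems pc := by
  rw [mem_pvItems]
  rw [pvLookup?] at h ⊢
  cases hf : pc.find? (fun e => e.1 == a && e.2.1 == b) with
  | none => rw [hf] at h; simp at h
  | some x =>
      rw [hf] at h
      simp only [Option.map_some, Option.some.injEq] at h
      have hx := List.find?_some hf
      simp only [Bool.and_eq_true, beq_iff_eq] at hx
      simp [h]

lemma set_contains_iff (l : List String) (a : String) :
    (PySem.Set.ofList l).contains a = true ↔ a ∈ l := by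
  simp [PySem.Set.contains, PySem.Set.mem_ofList]

theorem creates_cycle_eq (candidates : List String)
    (pc : List (String × String × Int)) :
    creates_cycle candidates pc = creates_cycle_alt candidates pc := by
  rw [Bool.eq_iff_iff]
  simp only [creates_cycle, creates_cycle_alt, List.any_eq_true]
  constructor
  · rintro ⟨c, hc, o, ho, hbody⟩
    by_cases hco : c = o
    · simp [hco] at hbody
    · rw [if_neg (by simpa using hco)] at hbody
      obtain ⟨v, w, h1, h2, hlt⟩ := (match2_eq_true _ _).mp hbody
      refine ⟨(c, o, v), pvLookup?_shape pc c o v h1, ?_⟩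
      simp only [Bool.and_eq_true, Bool.not_eq_eq_eq_not, Bool.not_true]
      exact ⟨⟨⟨(set_contains_iff _ _).mpr hc, (set_contains_iff _ _).mpr ho⟩,
        by simpa using hco⟩, (match1_eq_true _ _).mpr ⟨w, h2, hlt⟩⟩
  · rintro ⟨e, he, hbody⟩
    simp only [Bool.and_eq_true, Bool.not_eq_eq_eq_not, Bool.not_true] at hbody
    obtain ⟨⟨⟨h1, h2⟩, hne⟩, hm⟩ := hbody
    obtain ⟨w, hw, hlt⟩ := (match1_eq_true _ _).mp hm
    refine ⟨e.1, (set_contains_iff _ _).mp h1, e.2.1, (set_contains_iff _ _).mp h2, ?_⟩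
    rw [if_neg (by simpa using hne)]
    exact (match2_eq_true _ _).mpr ⟨e.2.2, w, (mem_pvItems pc e).mp he, hw, hlt⟩

-- ===== VERDICT (by name: the statement is the Claim_ definition above) =====
theorem creates_cycle_spec : Claim_equal_creates_cycle := by
  intro candidates pc _
  exact creates_cycle_eq candidates pc
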